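-- pv_equiv track=rewrite | github.com/as4584/repo-intelligence | src/change_radar/analysis/diff.py | _subject_variants
-- ===== SOURCE A (Python) =====
-- TEST_STEM_SUFFIXES = (".test", ".spec", "_test", "_spec", "-test", "-spec")
--
-- SOURCE_ROLE_SUFFIXES = (
--     ".service",
--     "_service",
--     ".controller",
--     "_controller",
--     ".route",
--     "_route",
--     ".handler",
--     "_handler",
-- )
--
-- def _subject_variants(stem: str) -> set[str]:
--     variants = {stem.lower()}
--     pending = list(variants)
--     while pending:
--         current = pending.pop()
--         for suffix in (*TEST_STEM_SUFFIXES, *SOURCE_ROLE_SUFFIXES):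
--             if not current.endswith(suffix):
--                 continue
--             trimmed = current[: -len(suffix)]
--             if trimmed and trimmed not in variants:
--                 variants.add(trimmed)
--                 pending.append(trimmed)
--         if current.startswith("test_"):
--             trimmed = current[5:]
--             if trimmed and trimmed not in variants:
--                 variants.add(trimmed)
--                 pending.append(trimmed)
--     return variants
-- ===== SOURCE B (Python) =====
-- TEST_STEM_SUFFIXES = (".test", ".spec", "_test", "_spec", "-test", "-spec")
--
-- SOURCE_ROLE_SUFFIXES = (
--     ".service",
--     "_service",
--     ".controller",
--     "_controller",
--     ".route",
--     "_route",
--     ".handler",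
--     "_handler",
-- )
--
-- def _subject_variants(stem: str) -> set[str]:
--     variants = {stem.lower()}
--
--     def visit(current: str) -> None:
--         for suffix in (*TEST_STEM_SUFFIXES, *SOURCE_ROLE_SUFFIXES):
--             if current.endswith(suffix):
--                 trimmed = current[: -len(suffix)]
--                 if trimmed and trimmed not in variants:
--                     variants.add(trimmed)
--                     visit(trimmed)
--         if current.startswith("test_"):
--             trimmed = current[5:]
--             if trimmed and trimmed not in variants:
--                 variants.add(trimmed)
--                 visit(trimmed)
--
--     visit(stem.lower())
--     return variants
-- ===== Notes on version B (the rewrite author's own statement) =====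
-- stated objective: alternative
-- what changed: The explicit pending-stack worklist loop of A is replaced by a recursive depth-first visit closure: each newly discovered trimmed variant is explored immediately via recursion (call stack) instead of being pushed onto and later popped from an explicit pending list; the variants set and its guards are unchanged.
import Mathlib
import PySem

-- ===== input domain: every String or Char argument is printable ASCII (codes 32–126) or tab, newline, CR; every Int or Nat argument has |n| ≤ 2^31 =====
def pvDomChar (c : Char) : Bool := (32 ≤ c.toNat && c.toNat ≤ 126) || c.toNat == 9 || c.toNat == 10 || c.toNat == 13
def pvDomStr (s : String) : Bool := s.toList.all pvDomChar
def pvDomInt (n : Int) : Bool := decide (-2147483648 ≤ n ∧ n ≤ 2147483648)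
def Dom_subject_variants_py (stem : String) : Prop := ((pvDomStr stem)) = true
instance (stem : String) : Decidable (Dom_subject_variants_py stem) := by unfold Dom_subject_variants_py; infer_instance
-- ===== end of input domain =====

-- B differs from A by decomposition: A drives the affix-stripping exploration with an explicit
-- worklist (`pending` stack popped in a while-loop); B replaces the worklist by a recursive
-- depth-first `visit` closure over the same membership-guarded `variants` set (objective:
-- alternative; same cost).  Python returns a set (no iteration order): both ports return the
-- set's elements as a sorted list, the canonical order-insensitive representation.

-- ===== PORT A =====
def pvSfxA : List (List Char) :=
  [".test".toList, ".spec".toList, "_test".toList, "_spec".toList, "-test".toList, "-spec".toList,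
   ".service".toList, "_service".toList, ".controller".toList, "_controller".toList,
   ".route".toList, "_route".toList, ".handler".toList, "_handler".toList]

def pvProcessA (current : List Char) (vp : List (List Char) × List (List Char)) :
    List (List Char) × List (List Char) :=
  let r := pvSfxA.foldl (fun vp suffix =>
    if PySem.Chars.endswith current suffix then
      let trimmed := PySem.List.slice current none (some (-(suffix.length : Int)))
      if trimmed ≠ [] ∧ trimmed ∉ vp.1 then (vp.1 ++ [trimmed], vp.2 ++ [trimmed]) else vp
    else vp) vp
  if PySem.Chars.startswith current "test_".toList then
    let trimmed := PySem.List.slice current (some 5) none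
    if trimmed ≠ [] ∧ trimmed ∉ r.1 then (r.1 ++ [trimmed], r.2 ++ [trimmed]) else r
  else r

lemma pvTrim_lt (c s : List Char) (h : PySem.List.slice c none (some (-(s.length : Int))) ≠ []) :
    (PySem.List.slice c none (some (-(s.length : Int)))).length < c.length := by
  rcases Nat.eq_zero_or_pos s.length with h0 | hk
  · rw [h0] at h
    simp only [Nat.cast_zero, neg_zero] at h
    rw [PySem.List.slice_to c (le_refl 0)] at h
    simp at h
  · rw [PySem.List.slice_to_neg_natCast c s.length hk] at h ⊢
    have hlen := List.length_pos_iff.mpr h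
    simp only [List.length_take] at hlen ⊢
    omega

lemma pvTrimPre_lt (c : List Char) (h : PySem.List.slice c (some 5) none ≠ []) :
    (PySem.List.slice c (some 5) none).length < c.length := by
  rw [PySem.List.slice_from c (by norm_num : (0:Int) ≤ 5)] at h ⊢
  have hlen := List.length_pos_iff.mpr h
  have h5 : (5:Int).toNat = 5 := rfl
  simp only [List.length_drop, h5] at hlen ⊢
  omega

lemma pvFoldA_extra (sfx : List (List Char)) (current : List Char)
    (vp : List (List Char) × List (List Char)) :
    ∃ extra, (sfx.foldl (fun vp suffix =>
      if PySem.Chars.endswith current suffix then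
        let trimmed := PySem.List.slice current none (some (-(suffix.length : Int)))
        if trimmed ≠ [] ∧ trimmed ∉ vp.1 then (vp.1 ++ [trimmed], vp.2 ++ [trimmed]) else vp
      else vp) vp) = (vp.1 ++ extra, vp.2 ++ extra) ∧
      extra.length ≤ sfx.length ∧ ∀ t ∈ extra, t.length < current.length := by
  induction sfx generalizing vp with
  | nil => exact ⟨[], by simp, by simp, by simp⟩
  | cons s rest ih =>
    simp only [List.foldl_cons]
    by_cases he : PySem.Chars.endswith current s
    · rw [if_pos he]
      set t := PySem.List.slice current none (some (-(s.length : Int))) with ht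
      by_cases hg : t ≠ [] ∧ t ∉ vp.1
      · rw [if_pos hg]
        obtain ⟨extra, h1, h2, h3⟩ := ih (vp.1 ++ [t], vp.2 ++ [t])
        refine ⟨t :: extra, ?_, by simp only [List.length_cons]; omega, ?_⟩
        · simpa [List.append_assoc] using h1
        · intro u hu
          rcases List.mem_cons.mp hu with rfl | hu
          · exact pvTrim_lt current s hg.1
          · exact h3 u hu
      · rw [if_neg hg]
        obtain ⟨extra, h1, h2, h3⟩ := ih vp
        exact ⟨extra, h1, by simp only [List.length_cons]; omega, h3⟩
    · rw [if_neg he]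
      obtain ⟨extra, h1, h2, h3⟩ := ih vp
      exact ⟨extra, h1, by simp only [List.length_cons]; omega, h3⟩

lemma pvProcessA_extra (current : List Char) (vp : List (List Char) × List (List Char)) :
    ∃ extra, pvProcessA current vp = (vp.1 ++ extra, vp.2 ++ extra) ∧
      extra.length ≤ 15 ∧ ∀ t ∈ extra, t.length < current.length := by
  unfold pvProcessA
  obtain ⟨extra, h1, h2, h3⟩ := pvFoldA_extra pvSfxA current vp
  rw [h1]
  have hsl : pvSfxA.length = 14 := by decide
  by_cases hs : PySem.Chars.startswith current "test_".toList
  · rw [if_pos hs]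
    set t := PySem.List.slice current (some 5) none with ht
    by_cases hg : t ≠ [] ∧ t ∉ vp.1 ++ extra
    · rw [if_pos hg]
      refine ⟨extra ++ [t], by simp, by simp only [List.length_append, List.length_singleton]; omega, ?_⟩
      intro u hu
      rcases List.mem_append.mp hu with hu | hu
      · exact h3 u hu
      · simp at hu; subst hu; exact pvTrimPre_lt current hg.1
    · rw [if_neg hg]
      exact ⟨extra, rfl, by omega, h3⟩
  · rw [if_neg hs]
    exact ⟨extra, rfl, by omega, h3⟩

def pvMeasureA (pending : List (List Char)) : Nat := (pending.map (fun c => 16 ^ c.length)).sum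

lemma pvMeasureA_dec (variants pending : List (List Char)) (hp : pending ≠ []) :
    pvMeasureA (pvProcessA (pending.getLast hp) (variants, pending.dropLast)).2 <
      pvMeasureA pending := by
  obtain ⟨extra, h1, hlen, hlt⟩ := pvProcessA_extra (pending.getLast hp) (variants, pending.dropLast)
  rw [h1]
  have hpe : pending.dropLast ++ [pending.getLast hp] = pending := List.dropLast_append_getLast hp
  conv_rhs => rw [← hpe]
  simp only [pvMeasureA, List.map_append, List.sum_append, List.map_cons, List.map_nil,
    List.sum_cons, List.sum_nil]
  have hkey : (extra.map (fun c => 16 ^ c.length)).sum < 16 ^ (pending.getLast hp).length := by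
    rcases Nat.eq_zero_or_pos (pending.getLast hp).length with hL | hL
    · have hex : extra = [] := by
        cases extra with
        | nil => rfl
        | cons a as => exact absurd (hlt a (by simp)) (by omega)
      simp [hex, hL]
    · set L := (pending.getLast hp).length with hLdef
      have hb : ∀ x ∈ extra.map (fun c => 16 ^ c.length), x ≤ 16 ^ (L - 1) := by
        intro x hx
        simp only [List.mem_map] at hx
        obtain ⟨t, ht, rfl⟩ := hx
        exact Nat.pow_le_pow_right (by norm_num) (by have := hlt t ht; omega)
      have hsum := List.sum_le_card_nsmul _ _ hb
      have hlen' : (extra.map (fun c => 16 ^ c.length)).length ≤ 15 := by simpa using hlen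
      have hpow : 16 ^ L = 16 * 16 ^ (L - 1) := by
        conv_lhs => rw [← Nat.sub_add_cancel hL]
        rw [pow_succ]
        ring
      have hBpos : 0 < 16 ^ (L - 1) := Nat.pow_pos (by norm_num)
      simp only [smul_eq_mul] at hsum
      calc (extra.map (fun c => 16 ^ c.length)).sum
          ≤ (extra.map (fun c => 16 ^ c.length)).length * 16 ^ (L - 1) := hsum
        _ ≤ 15 * 16 ^ (L - 1) := Nat.mul_le_mul_right _ hlen'
        _ < 16 * 16 ^ (L - 1) := by omega
        _ = 16 ^ L := hpow.symm
  omega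

def pvLoopA (variants pending : List (List Char)) : List (List Char) :=
  if hp : pending = [] then variants
  else
    let current := pending.getLast hp
    let r := pvProcessA current (variants, pending.dropLast)
    pvLoopA r.1 r.2
termination_by pvMeasureA pending
decreasing_by
  exact pvMeasureA_dec variants pending hp

def subject_variants_py (stem : String) : List String :=
  let seed := PySem.Chars.lower stem.toList
  let final := pvLoopA [seed] [seed]
  PySem.List.sorted (final.map String.ofList) (fun x => x) false
-- ===== PORT B =====
def pvSfxB : List (List Char) :=
  [".test".toList, ".spec".toList, "_test".toList, "_spec".toList, "-test".toList, "-spec".toList,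
   ".service".toList, "_service".toList, ".controller".toList, "_controller".toList,
   ".route".toList, "_route".toList, ".handler".toList, "_handler".toList]

-- B's recursive visit: sfx = suffixes still to try on current; [] means only the
-- "test_" prefix rule remains.  The call stack replaces A's explicit pending list.
def pvVisitB (sfx : List (List Char)) (current : List Char) (variants : List (List Char)) :
    List (List Char) :=
  match sfx with
  | [] =>
    if PySem.Chars.startswith current "test_".toList then
      let trimmed := PySem.List.slice current (some 5) none
      if h : trimmed ≠ [] ∧ trimmed ∉ variants then
        pvVisitB pvSfxB trimmed (variants ++ [trimmed])
      else variants
    else variants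
  | s :: rest =>
    if PySem.Chars.endswith current s then
      let trimmed := PySem.List.slice current none (some (-(s.length : Int)))
      if h : trimmed ≠ [] ∧ trimmed ∉ variants then
        pvVisitB rest current (pvVisitB pvSfxB trimmed (variants ++ [trimmed]))
      else pvVisitB rest current variants
    else pvVisitB rest current variants
termination_by (current.length, sfx.length)
decreasing_by
  · exact Prod.Lex.left _ _ (pvTrimPre_lt current h.1)
  · exact Prod.Lex.left _ _ (pvTrim_lt current s h.1)
  · exact Prod.Lex.right _ (by simp)
  · exact Prod.Lex.right _ (by simp)
  · exact Prod.Lex.right _ (by simp)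

def subject_variants_py_alt (stem : String) : List String :=
  let seed := PySem.Chars.lower stem.toList
  let final := pvVisitB pvSfxB seed [seed]
  PySem.List.sorted (final.map String.ofList) (fun x => x) false

-- ===== PRECONDITION & SPEC =====
def Spec_subject_variants_py (stem : String) (out : List String) : Prop := out = subject_variants_py_alt stem
instance (stem : String) (out : List String) : Decidable (Spec_subject_variants_py stem out) := by unfold Spec_subject_variants_py; infer_instance

-- ===== CLAIM =====
def Claim_equal_subject_variants_py : Prop := ∀ (stem : String), Dom_subject_variants_py stem → Spec_subject_variants_py stem (subject_variants_py stem)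

-- ===== LEMMAS AND PROOFS =====

-- "strip one affix, if it applies and leaves something": the single-step relation both
-- programs explore; pvChildren c lists every string obtainable from c in one step.
def pvStripSfx (c s : List Char) : Option (List Char) :=
  if PySem.Chars.endswith c s then
    let t := PySem.List.slice c none (some (-(s.length : Int)))
    if t = [] then none else some t
  else none

def pvStripPre (c : List Char) : Option (List Char) :=
  if PySem.Chars.startswith c "test_".toList then
    let t := PySem.List.slice c (some 5) none
    if t = [] then none else some t
  else none

def pvChildren (c : List Char) : List (List Char) :=
  pvSfxA.filterMap (fun s => pvStripSfx c s) ++ (pvStripPre c).toList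

inductive PvReach (seed : List Char) : List Char → Prop
  | refl : PvReach seed seed
  | step {x y : List Char} : PvReach seed x → y ∈ pvChildren x → PvReach seed y

lemma mem_pvChildren (c y : List Char) :
    y ∈ pvChildren c ↔ (∃ s ∈ pvSfxA, pvStripSfx c s = some y) ∨ pvStripPre c = some y := by
  simp [pvChildren, List.mem_filterMap]

lemma pvSfxB_eq : pvSfxB = pvSfxA := rfl

-- ---- A side: characterize the worklist loop ----

lemma pvFoldA_spec (sfx : List (List Char)) (current : List Char)
    (v p : List (List Char)) :
    ∃ extra, (sfx.foldl (fun vp suffix =>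
      if PySem.Chars.endswith current suffix then
        let trimmed := PySem.List.slice current none (some (-(suffix.length : Int)))
        if trimmed ≠ [] ∧ trimmed ∉ vp.1 then (vp.1 ++ [trimmed], vp.2 ++ [trimmed]) else vp
      else vp) (v, p)) = (v ++ extra, p ++ extra) ∧
      (∀ t ∈ extra, ∃ s ∈ sfx, pvStripSfx current s = some t) ∧
      (∀ s ∈ sfx, ∀ t, pvStripSfx current s = some t → t ∈ v ++ extra) ∧
      (v.Nodup → (v ++ extra).Nodup) := by
  induction sfx generalizing v p with
  | nil => exact ⟨[], by simp, by simp, by simp, by simp⟩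
  | cons s rest ih =>
    simp only [List.foldl_cons]
    by_cases he : PySem.Chars.endswith current s
    · rw [if_pos he]
      set t := PySem.List.slice current none (some (-(s.length : Int))) with ht
      by_cases hg : t ≠ [] ∧ t ∉ v
      · rw [if_pos hg]
        obtain ⟨extra, h1, h2, h3, h4⟩ := ih (v ++ [t]) (p ++ [t])
        have hstrip : pvStripSfx current s = some t := by
          simp only [pvStripSfx, if_pos he, ← ht]
          rw [if_neg hg.1]
        refine ⟨t :: extra, by simpa [List.append_assoc] using h1, ?_, ?_, ?_⟩
        · intro u hu
          rcases List.mem_cons.mp hu with rfl | hu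
          · exact ⟨s, by simp, hstrip⟩
          · obtain ⟨s', hs', hstr⟩ := h2 u hu
            exact ⟨s', by simp [hs'], hstr⟩
        · intro s' hs' u hstr
          rcases List.mem_cons.mp hs' with rfl | hs'
          · rw [hstrip] at hstr
            have h' : u = t := (Option.some_inj.mp hstr).symm
            rw [h']
            simp
          · have := h3 s' hs' u hstr
            simpa [List.append_assoc] using this
        · intro hnd
          have hvt : (v ++ [t]).Nodup :=
            ((List.perm_append_singleton t v).nodup_iff).mpr (List.nodup_cons.mpr ⟨hg.2, hnd⟩)
          have := h4 hvt
          simpa [List.append_assoc] using this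
      · rw [if_neg hg]
        obtain ⟨extra, h1, h2, h3, h4⟩ := ih v p
        refine ⟨extra, h1, ?_, ?_, h4⟩
        · intro u hu
          obtain ⟨s', hs', hstr⟩ := h2 u hu
          exact ⟨s', by simp [hs'], hstr⟩
        · intro s' hs' u hstr
          rcases List.mem_cons.mp hs' with rfl | hs'
          · -- guard failed: either t = [] (strip is none) or t ∈ v
            simp only [pvStripSfx, if_pos he, ← ht] at hstr
            by_cases h0 : t = []
            · rw [if_pos h0] at hstr; exact absurd hstr (by simp)
            · rw [if_neg h0] at hstr
              have h' : u = t := (Option.some_inj.mp hstr).symm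
              rw [h']
              have htv : t ∈ v := by
                by_contra hc
                exact hg ⟨h0, hc⟩
              exact List.mem_append_left _ htv
          · exact h3 s' hs' u hstr
    · rw [if_neg he]
      obtain ⟨extra, h1, h2, h3, h4⟩ := ih v p
      refine ⟨extra, h1, ?_, ?_, h4⟩
      · intro u hu
        obtain ⟨s', hs', hstr⟩ := h2 u hu
        exact ⟨s', by simp [hs'], hstr⟩
      · intro s' hs' u hstr
        rcases List.mem_cons.mp hs' with rfl | hs'
        · simp only [pvStripSfx, if_neg he] at hstr
          exact absurd hstr (by simp)
        · exact h3 s' hs' u hstr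

lemma pvProcessA_spec (current : List Char) (v p : List (List Char)) :
    ∃ extra, pvProcessA current (v, p) = (v ++ extra, p ++ extra) ∧
      (∀ t ∈ extra, t ∈ pvChildren current) ∧
      (∀ y ∈ pvChildren current, y ∈ v ++ extra) ∧
      (v.Nodup → (v ++ extra).Nodup) := by
  unfold pvProcessA
  obtain ⟨extra, h1, h2, h3, h4⟩ := pvFoldA_spec pvSfxA current v p
  rw [h1]
  by_cases hs : PySem.Chars.startswith current "test_".toList
  · rw [if_pos hs]
    set t := PySem.List.slice current (some 5) none with ht
    by_cases hg : t ≠ [] ∧ t ∉ v ++ extra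
    · rw [if_pos hg]
      have hstrip : pvStripPre current = some t := by
        simp only [pvStripPre, if_pos hs, ← ht]
        rw [if_neg hg.1]
      refine ⟨extra ++ [t], by simp, ?_, ?_, ?_⟩
      · intro u hu
        rcases List.mem_append.mp hu with hu | hu
        · obtain ⟨s', hs', hstr⟩ := h2 u hu
          exact (mem_pvChildren current u).mpr (Or.inl ⟨s', hs', hstr⟩)
        · have := List.mem_singleton.mp hu
          subst this
          exact (mem_pvChildren current t).mpr (Or.inr hstrip)
      · intro y hy
        rcases (mem_pvChildren current y).mp hy with ⟨s', hs', hstr⟩ | hpre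
        · have := h3 s' hs' y hstr
          simpa [List.append_assoc] using List.mem_append_left [t] this
        · rw [hstrip] at hpre
          have h' : y = t := (Option.some_inj.mp hpre).symm
          rw [h']
          simp
      · intro hnd
        have hvx := h4 hnd
        have hall : ((v ++ extra) ++ [t]).Nodup :=
          ((List.perm_append_singleton t (v ++ extra)).nodup_iff).mpr (List.nodup_cons.mpr ⟨hg.2, hvx⟩)
        simpa [List.append_assoc] using hall
    · rw [if_neg hg]
      refine ⟨extra, rfl, ?_, ?_, h4⟩
      · intro u hu
        obtain ⟨s', hs', hstr⟩ := h2 u hu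
        exact (mem_pvChildren current u).mpr (Or.inl ⟨s', hs', hstr⟩)
      · intro y hy
        rcases (mem_pvChildren current y).mp hy with ⟨s', hs', hstr⟩ | hpre
        · exact h3 s' hs' y hstr
        · -- prefix guard failed: t = [] (strip none) or t ∈ v ++ extra
          simp only [pvStripPre, if_pos hs, ← ht] at hpre
          by_cases h0 : t = []
          · rw [if_pos h0] at hpre; exact absurd hpre (by simp)
          · rw [if_neg h0] at hpre
            have h' : y = t := (Option.some_inj.mp hpre).symm
            rw [h']
            by_contra hc
            exact hg ⟨h0, hc⟩
  · rw [if_neg hs]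
    refine ⟨extra, rfl, ?_, ?_, h4⟩
    · intro u hu
      obtain ⟨s', hs', hstr⟩ := h2 u hu
      exact (mem_pvChildren current u).mpr (Or.inl ⟨s', hs', hstr⟩)
    · intro y hy
      rcases (mem_pvChildren current y).mp hy with ⟨s', hs', hstr⟩ | hpre
      · exact h3 s' hs' y hstr
      · simp only [pvStripPre, if_neg hs] at hpre
        exact absurd hpre (by simp)

theorem pvLoopA_specN (R : List Char → Prop) (hR : ∀ x y, R x → y ∈ pvChildren x → R y) :
    ∀ (n : Nat) (v p : List (List Char)), pvMeasureA p = n →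
    (∀ x ∈ p, x ∈ v) →
    (∀ x ∈ v, x ∈ p ∨ ∀ y ∈ pvChildren x, y ∈ v) →
    v.Nodup → (∀ x ∈ v, R x) →
    (∀ x ∈ v, x ∈ pvLoopA v p) ∧ (∀ x ∈ pvLoopA v p, R x) ∧
    (∀ x ∈ pvLoopA v p, ∀ y ∈ pvChildren x, y ∈ pvLoopA v p) ∧ (pvLoopA v p).Nodup := by
  intro n
  induction n using Nat.strong_induction_on with
  | _ n ihn =>
    intro v p hm hpv hcl hnd hvR
    by_cases hp : p = []
    · subst hp
      rw [pvLoopA]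
      refine ⟨fun x hx => hx, hvR, ?_, hnd⟩
      intro x hx y hy
      rcases hcl x hx with h | h
      · simp at h
      · exact h y hy
    · obtain ⟨extra, hre, hch, hcc, hnod⟩ := pvProcessA_spec (p.getLast hp) v p.dropLast
      have heq2 : pvLoopA v p = pvLoopA (v ++ extra) (p.dropLast ++ extra) := by
        conv_lhs => rw [pvLoopA]
        rw [dif_neg hp]
        show pvLoopA (pvProcessA (p.getLast hp) (v, p.dropLast)).1
          (pvProcessA (p.getLast hp) (v, p.dropLast)).2 = _
        rw [hre]
      have hdec : pvMeasureA (p.dropLast ++ extra) < n := by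
        rw [← hm]
        have hd := pvMeasureA_dec v p hp
        rw [hre] at hd
        exact hd
      have hcur : p.getLast hp ∈ v := hpv _ (List.getLast_mem hp)
      have hpe : p.dropLast ++ [p.getLast hp] = p := List.dropLast_append_getLast hp
      have hpv' : ∀ x ∈ p.dropLast ++ extra, x ∈ v ++ extra := by
        intro x hx
        rcases List.mem_append.mp hx with hx | hx
        · exact List.mem_append_left _ (hpv x ((List.dropLast_sublist p).subset hx))
        · exact List.mem_append_right _ hx
      have hcl' : ∀ x ∈ v ++ extra, x ∈ p.dropLast ++ extra ∨ ∀ y ∈ pvChildren x, y ∈ v ++ extra := by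
        intro x hx
        rcases List.mem_append.mp hx with hx | hx
        · rcases hcl x hx with hxp | hxc
          · rw [← hpe] at hxp
            rcases List.mem_append.mp hxp with hxp | hxp
            · exact Or.inl (List.mem_append_left _ hxp)
            · have hxc2 : x = p.getLast hp := List.mem_singleton.mp hxp
              rw [hxc2]
              exact Or.inr hcc
          · exact Or.inr (fun y hy => List.mem_append_left _ (hxc y hy))
        · exact Or.inl (List.mem_append_right _ hx)
      have hvR' : ∀ x ∈ v ++ extra, R x := by
        intro x hx
        rcases List.mem_append.mp hx with hx | hx
        · exact hvR x hx
        · exact hR _ x (hvR _ hcur) (hch x hx)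
      obtain ⟨g1, g2, g3, g4⟩ := ihn _ hdec (v ++ extra) (p.dropLast ++ extra) rfl
        hpv' hcl' (hnod hnd) hvR'
      rw [heq2]
      exact ⟨fun x hx => g1 x (List.mem_append_left _ hx), g2, g3, g4⟩

theorem pvLoopA_spec (R : List Char → Prop) (hR : ∀ x y, R x → y ∈ pvChildren x → R y)
    (v p : List (List Char))
    (hpv : ∀ x ∈ p, x ∈ v)
    (hcl : ∀ x ∈ v, x ∈ p ∨ ∀ y ∈ pvChildren x, y ∈ v)
    (hnd : v.Nodup) (hvR : ∀ x ∈ v, R x) :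
    (∀ x ∈ v, x ∈ pvLoopA v p) ∧ (∀ x ∈ pvLoopA v p, R x) ∧
    (∀ x ∈ pvLoopA v p, ∀ y ∈ pvChildren x, y ∈ pvLoopA v p) ∧ (pvLoopA v p).Nodup :=
  pvLoopA_specN R hR (pvMeasureA p) v p rfl hpv hcl hnd hvR

lemma pvLoopA_main (seed : List Char) :
    (∀ x, x ∈ pvLoopA [seed] [seed] ↔ PvReach seed x) ∧ (pvLoopA [seed] [seed]).Nodup := by
  obtain ⟨g1, g2, g3, g4⟩ := pvLoopA_spec (PvReach seed)
    (fun x y hx hy => PvReach.step hx hy) [seed] [seed]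
    (fun x hx => hx)
    (by intro x hx; simp at hx; subst hx; exact Or.inl (by simp))
    (List.nodup_singleton seed)
    (by intro x hx; simp at hx; subst hx; exact PvReach.refl)
  refine ⟨fun x => ⟨g2 x, ?_⟩, g4⟩
  intro hr
  induction hr with
  | refl => exact g1 seed (by simp)
  | step hx hy ihx => exact g3 _ ihx _ hy

-- ---- B side: characterize the recursive DFS ----

lemma pvVisitB_mono (sfx : List (List Char)) (current : List Char) (v : List (List Char)) :
    ∃ extra, pvVisitB sfx current v = v ++ extra := by
  induction sfx, current, v using pvVisitB.induct with
  | case1 current v hs tr hg ih =>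
    rw [pvVisitB, if_pos hs, dif_pos hg]
    obtain ⟨e, he⟩ := ih
    exact ⟨tr :: e, by rw [he]; simp⟩
  | case2 current v hs tr hg =>
    rw [pvVisitB, if_pos hs, dif_neg hg]
    exact ⟨[], by simp⟩
  | case3 current v hs =>
    rw [pvVisitB, if_neg hs]
    exact ⟨[], by simp⟩
  | case4 current v s rest he tr hg ih1 ih1' ih2 =>
    rw [pvVisitB, if_pos he, dif_pos hg]
    obtain ⟨e2, he2⟩ := ih2
    obtain ⟨e1, he1⟩ := ih1
    refine ⟨tr :: (e1 ++ e2), ?_⟩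
    rw [he2, he1]
    simp
  | case5 current v s rest he tr hg ih =>
    rw [pvVisitB, if_pos he, dif_neg hg]
    exact ih
  | case6 current v s rest he ih =>
    rw [pvVisitB, if_neg he]
    exact ih

lemma pvVisitB_nodup : ∀ (sfx : List (List Char)) (current : List Char) (v : List (List Char)),
    v.Nodup → (pvVisitB sfx current v).Nodup := by
  intro sfx current v
  induction sfx, current, v using pvVisitB.induct with
  | case1 current v hs tr hg ih =>
    intro hnd
    rw [pvVisitB, if_pos hs, dif_pos hg]
    refine ih ?_
    exact ((List.perm_append_singleton _ v).nodup_iff).mpr (List.nodup_cons.mpr ⟨hg.2, hnd⟩)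
  | case2 current v hs tr hg =>
    intro hnd
    rw [pvVisitB, if_pos hs, dif_neg hg]
    exact hnd
  | case3 current v hs =>
    intro hnd
    rw [pvVisitB, if_neg hs]
    exact hnd
  | case4 current v s rest he tr hg ih1 ih1' ih2 =>
    intro hnd
    rw [pvVisitB, if_pos he, dif_pos hg]
    refine ih2 (ih1 ?_)
    exact ((List.perm_append_singleton _ v).nodup_iff).mpr (List.nodup_cons.mpr ⟨hg.2, hnd⟩)
  | case5 current v s rest he tr hg ih =>
    intro hnd
    rw [pvVisitB, if_pos he, dif_neg hg]
    exact ih hnd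
  | case6 current v s rest he ih =>
    intro hnd
    rw [pvVisitB, if_neg he]
    exact ih hnd

lemma pvVisitB_sound (R : List Char → Prop) (hR : ∀ x y, R x → y ∈ pvChildren x → R y) :
    ∀ (sfx : List (List Char)) (current : List Char) (v : List (List Char)),
    (∀ s ∈ sfx, s ∈ pvSfxA) → R current → (∀ x ∈ v, R x) →
    ∀ x ∈ pvVisitB sfx current v, R x := by
  intro sfx current v
  induction sfx, current, v using pvVisitB.induct with
  | case1 current v hs tr hg ih =>
    intro hsub hcur hv
    rw [pvVisitB, if_pos hs, dif_pos hg]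
    have hstrip : pvStripPre current = some (PySem.List.slice current (some 5) none) := by
      simp only [pvStripPre, if_pos hs]
      rw [if_neg hg.1]
    have htR : R (PySem.List.slice current (some 5) none) :=
      hR current _ hcur ((mem_pvChildren current _).mpr (Or.inr hstrip))
    refine ih (by rw [pvSfxB_eq]; exact fun s hs' => hs') htR ?_
    intro x hx
    rcases List.mem_append.mp hx with hx | hx
    · exact hv x hx
    · exact (List.mem_singleton.mp hx) ▸ htR
  | case2 current v hs tr hg =>
    intro hsub hcur hv
    rw [pvVisitB, if_pos hs, dif_neg hg]
    exact hv
  | case3 current v hs =>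
    intro hsub hcur hv
    rw [pvVisitB, if_neg hs]
    exact hv
  | case4 current v s rest he tr hg ih1 ih1' ih2 =>
    intro hsub hcur hv
    rw [pvVisitB, if_pos he, dif_pos hg]
    have hstrip : pvStripSfx current s = some (PySem.List.slice current none (some (-(s.length : Int)))) := by
      simp only [pvStripSfx, if_pos he]
      rw [if_neg hg.1]
    have htR : R (PySem.List.slice current none (some (-(s.length : Int)))) :=
      hR current _ hcur ((mem_pvChildren current _).mpr (Or.inl ⟨s, hsub s (by simp), hstrip⟩))
    have hinner := ih1 (by rw [pvSfxB_eq]; exact fun s' hs' => hs') htR (by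
      intro x hx
      rcases List.mem_append.mp hx with hx | hx
      · exact hv x hx
      · exact (List.mem_singleton.mp hx) ▸ htR)
    exact ih2 (fun s' hs' => hsub s' (by simp [hs'])) hcur hinner
  | case5 current v s rest he tr hg ih =>
    intro hsub hcur hv
    rw [pvVisitB, if_pos he, dif_neg hg]
    exact ih (fun s' hs' => hsub s' (by simp [hs'])) hcur hv
  | case6 current v s rest he ih =>
    intro hsub hcur hv
    rw [pvVisitB, if_neg he]
    exact ih (fun s' hs' => hsub s' (by simp [hs'])) hcur hv
lemma pvVisitB_closure : ∀ (sfx : List (List Char)) (current : List Char) (v : List (List Char)),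
    (∀ s ∈ sfx, s ∈ pvSfxA) →
    (∀ s ∈ sfx, ∀ t, pvStripSfx current s = some t → t ∈ pvVisitB sfx current v) ∧
    (∀ t, pvStripPre current = some t → t ∈ pvVisitB sfx current v) ∧
    (∀ x ∈ pvVisitB sfx current v, x ∉ v → ∀ y ∈ pvChildren x, y ∈ pvVisitB sfx current v) := by
  intro sfx current v
  induction sfx, current, v using pvVisitB.induct with
  | case1 current v hs tr hg ih =>
    intro hsub
    rw [pvVisitB, if_pos hs, dif_pos hg]
    obtain ⟨i1, i2, i3⟩ := ih (by rw [pvSfxB_eq]; exact fun s hs' => hs')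
    obtain ⟨e, he⟩ := pvVisitB_mono pvSfxB (PySem.List.slice current (some 5) none)
      (v ++ [PySem.List.slice current (some 5) none])
    have hstrip : pvStripPre current = some (PySem.List.slice current (some 5) none) := by
      simp only [pvStripPre, if_pos hs]
      rw [if_neg hg.1]
    have htmem : PySem.List.slice current (some 5) none ∈
        pvVisitB pvSfxB (PySem.List.slice current (some 5) none)
          (v ++ [PySem.List.slice current (some 5) none]) := by
      rw [he]; simp
    refine ⟨by simp, ?_, ?_⟩
    · intro t' hstr
      rw [hstrip] at hstr
      have h' : t' = PySem.List.slice current (some 5) none := (Option.some_inj.mp hstr).symm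
      rw [h']
      exact htmem
    · intro x hx hxv y hy
      by_cases hx1 : x = PySem.List.slice current (some 5) none
      · rw [hx1] at hy
        rcases (mem_pvChildren _ y).mp hy with ⟨s', hs', hstr⟩ | hpre
        · exact i1 s' (by rw [pvSfxB_eq]; exact hs') y hstr
        · exact i2 y hpre
      · have hx2 : x ∉ v ++ [PySem.List.slice current (some 5) none] := by
          intro hc
          rcases List.mem_append.mp hc with hc | hc
          · exact hxv hc
          · exact hx1 (List.mem_singleton.mp hc)
        exact i3 x hx hx2 y hy
  | case2 current v hs tr hg =>
    intro hsub
    rw [pvVisitB, if_pos hs, dif_neg hg]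
    refine ⟨by simp, ?_, ?_⟩
    · intro t' hstr
      simp only [pvStripPre, if_pos hs] at hstr
      by_cases h0 : PySem.List.slice current (some 5) none = []
      · rw [if_pos h0] at hstr
        exact absurd hstr (by simp)
      · rw [if_neg h0] at hstr
        have := Option.some_inj.mp hstr
        subst this
        push_neg at hg
        exact hg h0
    · intro x hx hxv
      exact absurd hx hxv
  | case3 current v hs =>
    intro hsub
    rw [pvVisitB, if_neg hs]
    refine ⟨by simp, ?_, ?_⟩
    · intro t' hstr
      simp only [pvStripPre, if_neg hs] at hstr
      exact absurd hstr (by simp)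
    · intro x hx hxv
      exact absurd hx hxv
  | case4 current v s rest he tr hg ih1 ih1' ih2 =>
    intro hsub
    rw [pvVisitB, if_pos he, dif_pos hg]
    obtain ⟨i1, i2, i3⟩ := ih1 (by rw [pvSfxB_eq]; exact fun s' hs' => hs')
    obtain ⟨j1, j2, j3⟩ := ih2 (fun s' hs' => hsub s' (by simp [hs']))
    obtain ⟨e1, he1⟩ := pvVisitB_mono pvSfxB (PySem.List.slice current none (some (-(s.length : Int))))
      (v ++ [PySem.List.slice current none (some (-(s.length : Int)))])
    obtain ⟨e2, he2⟩ := pvVisitB_mono rest current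
      (pvVisitB pvSfxB (PySem.List.slice current none (some (-(s.length : Int))))
        (v ++ [PySem.List.slice current none (some (-(s.length : Int)))]))
    have hstrip : pvStripSfx current s
        = some (PySem.List.slice current none (some (-(s.length : Int)))) := by
      simp only [pvStripSfx, if_pos he]
      rw [if_neg hg.1]
    have hVsub : ∀ z ∈ pvVisitB pvSfxB (PySem.List.slice current none (some (-(s.length : Int))))
          (v ++ [PySem.List.slice current none (some (-(s.length : Int)))]),
        z ∈ pvVisitB rest current
          (pvVisitB pvSfxB (PySem.List.slice current none (some (-(s.length : Int))))
            (v ++ [PySem.List.slice current none (some (-(s.length : Int)))])) := by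
      intro z hz; rw [he2]; exact List.mem_append_left _ hz
    refine ⟨?_, j2, ?_⟩
    · intro s' hs' t' hstr
      rcases List.mem_cons.mp hs' with hseq | hs'
      · rw [hseq, hstrip] at hstr
        have h' : t' = PySem.List.slice current none (some (-(s.length : Int))) :=
          (Option.some_inj.mp hstr).symm
        rw [h']
        exact hVsub _ (by rw [he1]; simp)
      · exact j1 s' hs' t' hstr
    · intro x hx hxv y hy
      by_cases hxV : x ∈ pvVisitB pvSfxB (PySem.List.slice current none (some (-(s.length : Int))))
          (v ++ [PySem.List.slice current none (some (-(s.length : Int)))])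
      · by_cases hx1 : x = PySem.List.slice current none (some (-(s.length : Int)))
        · rw [hx1] at hy
          rcases (mem_pvChildren _ y).mp hy with ⟨s', hs', hstr⟩ | hpre
          · exact hVsub _ (i1 s' (by rw [pvSfxB_eq]; exact hs') y hstr)
          · exact hVsub _ (i2 y hpre)
        · have hx2 : x ∉ v ++ [PySem.List.slice current none (some (-(s.length : Int)))] := by
            intro hc
            rcases List.mem_append.mp hc with hc | hc
            · exact hxv hc
            · exact hx1 (List.mem_singleton.mp hc)
          exact hVsub _ (i3 x hxV hx2 y hy)
      · exact j3 x hx hxV y hy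
  | case5 current v s rest he tr hg ih =>
    intro hsub
    rw [pvVisitB, if_pos he, dif_neg hg]
    obtain ⟨j1, j2, j3⟩ := ih (fun s' hs' => hsub s' (by simp [hs']))
    obtain ⟨e, he'⟩ := pvVisitB_mono rest current v
    refine ⟨?_, j2, j3⟩
    intro s' hs' t' hstr
    rcases List.mem_cons.mp hs' with hseq | hs'
    · rw [hseq] at hstr
      simp only [pvStripSfx, if_pos he] at hstr
      by_cases h0 : PySem.List.slice current none (some (-(s.length : Int))) = []
      · rw [if_pos h0] at hstr
        exact absurd hstr (by simp)
      · rw [if_neg h0] at hstr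
        have h' : t' = PySem.List.slice current none (some (-(s.length : Int))) :=
          (Option.some_inj.mp hstr).symm
        rw [h', he']
        push_neg at hg
        exact List.mem_append_left _ (hg h0)
    · exact j1 s' hs' t' hstr
  | case6 current v s rest he ih =>
    intro hsub
    rw [pvVisitB, if_neg he]
    obtain ⟨j1, j2, j3⟩ := ih (fun s' hs' => hsub s' (by simp [hs']))
    refine ⟨?_, j2, j3⟩
    intro s' hs' t' hstr
    rcases List.mem_cons.mp hs' with rfl | hs'
    · simp only [pvStripSfx, if_neg he] at hstr
      exact absurd hstr (by simp)
    · exact j1 s' hs' t' hstr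

lemma pvVisitB_main (seed : List Char) :
    (∀ x, x ∈ pvVisitB pvSfxB seed [seed] ↔ PvReach seed x) ∧
    (pvVisitB pvSfxB seed [seed]).Nodup := by
  have hsub : ∀ s ∈ pvSfxB, s ∈ pvSfxA := by rw [pvSfxB_eq]; exact fun s hs => hs
  have hsound := pvVisitB_sound (PvReach seed) (fun x y hx hy => PvReach.step hx hy)
    pvSfxB seed [seed] hsub PvReach.refl
    (by intro x hx; simp at hx; subst hx; exact PvReach.refl)
  obtain ⟨c1, c2, c3⟩ := pvVisitB_closure pvSfxB seed [seed] hsub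
  obtain ⟨e, he⟩ := pvVisitB_mono pvSfxB seed [seed]
  have hseed : seed ∈ pvVisitB pvSfxB seed [seed] := by rw [he]; simp
  have hclosed : ∀ x ∈ pvVisitB pvSfxB seed [seed], ∀ y ∈ pvChildren x,
      y ∈ pvVisitB pvSfxB seed [seed] := by
    intro x hx y hy
    by_cases hx1 : x = seed
    · subst hx1
      rcases (mem_pvChildren x y).mp hy with ⟨s', hs', hstr⟩ | hpre
      · exact c1 s' (by rw [pvSfxB_eq]; exact hs') y hstr
      · exact c2 y hpre
    · exact c3 x hx (by simp [hx1]) y hy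
  refine ⟨fun x => ⟨hsound x, ?_⟩, pvVisitB_nodup pvSfxB seed [seed] (List.nodup_singleton seed)⟩
  intro hr
  induction hr with
  | refl => exact hseed
  | step hx hy ihx => exact hclosed _ ihx _ hy

-- ===== VERDICT =====
theorem subject_variants_py_spec : Claim_equal_subject_variants_py := by
  intro stem _
  unfold Spec_subject_variants_py subject_variants_py subject_variants_py_alt
  obtain ⟨hAm, hAn⟩ := pvLoopA_main (PySem.Chars.lower stem.toList)
  obtain ⟨hBm, hBn⟩ := pvVisitB_main (PySem.Chars.lower stem.toList)
  have hperm : (pvLoopA [PySem.Chars.lower stem.toList] [PySem.Chars.lower stem.toList]).Perm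
      (pvVisitB pvSfxB (PySem.Chars.lower stem.toList) [PySem.Chars.lower stem.toList]) :=
    (List.perm_ext_iff_of_nodup hAn hBn).mpr (fun x => (hAm x).trans (hBm x).symm)
  exact PySem.List.sorted_eq_sorted_of_perm _ _ _ (fun a b h => h) (hperm.map String.ofList)
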